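-- pv_equiv track=rewrite | github.com/paiml/depyler | examples/hard_wave3_013.py | continued_fraction_golden
-- ===== SOURCE A (Python) =====
-- from typing import List, Tuple
--
-- def continued_fraction_golden(terms: int) -> Tuple[int, int]:
--     """Compute convergent of golden ratio = [1; 1, 1, 1, ...] as p/q."""
--     if terms <= 0:
--         return (1, 1)
--     p_prev: int = 1
--     q_prev: int = 0
--     p_curr: int = 1
--     q_curr: int = 1
--     i: int = 0
--     while i < terms:
--         p_new: int = p_curr + p_prev
--         q_new: int = q_curr + q_prev
--         p_prev = p_curr
--         q_prev = q_curr
--         p_curr = p_new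
--         q_curr = q_new
--         i += 1
--     return (p_curr, q_curr)
-- ===== SOURCE B (Python) =====
-- def continued_fraction_golden(terms):
--     """Compute convergent of golden ratio = [1; 1, 1, 1, ...] as p/q."""
--     if terms <= 0:
--         return (1, 1)
--
--     def fd(n):
--         # returns (F(n), F(n+1)) by fast doubling
--         if n == 0:
--             return (0, 1)
--         a, b = fd(n >> 1)
--         c = a * (2 * b - a)
--         d = a * a + b * b
--         if n & 1:
--             return (d, c + d)
--         return (c, d)
--
--     fn1, fn2 = fd(terms + 1)  # (F(terms+1), F(terms+2))
--     return (fn2, fn1)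
-- ===== Notes on version B (the rewrite author's own statement) =====
-- stated objective: faster
-- what changed: Replaced the O(n) term-by-term convergent loop with fast-doubling Fibonacci computing F(terms+2), F(terms+1) directly; intended as faster (a timing run measured ~135x at the largest size both runs finished).
import Mathlib
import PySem

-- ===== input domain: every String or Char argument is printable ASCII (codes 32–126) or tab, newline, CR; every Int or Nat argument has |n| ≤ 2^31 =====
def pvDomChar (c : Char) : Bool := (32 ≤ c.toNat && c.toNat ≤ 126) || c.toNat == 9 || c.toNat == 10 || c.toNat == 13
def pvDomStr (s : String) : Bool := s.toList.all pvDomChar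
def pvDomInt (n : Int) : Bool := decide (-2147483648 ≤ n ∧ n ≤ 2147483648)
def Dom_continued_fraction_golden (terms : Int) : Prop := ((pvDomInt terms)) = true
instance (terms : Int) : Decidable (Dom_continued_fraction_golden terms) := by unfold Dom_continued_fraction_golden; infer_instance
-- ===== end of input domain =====

-- B replaces A's O(n) convergent loop with fast-doubling Fibonacci (O(log n) steps); intended as faster — a timing run measured ~135x at the largest size both finished.

-- ===== PORT A =====
-- A's while-loop over state (p_prev, q_prev, p_curr, q_curr); fuel = number of remaining iterations (terms - i).
def cfgLoop : Nat → Int × Int × Int × Int → Int × Int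
  | 0, (_, _, pc, qc) => (pc, qc)
  | n + 1, (pp, qp, pc, qc) => cfgLoop n (pc, qc, pc + pp, qc + qp)

def continued_fraction_golden (terms : Int) : Int × Int :=
  if terms ≤ 0 then (1, 1)
  else cfgLoop terms.toNat (1, 0, 1, 1)

-- ===== PORT B =====
-- fast doubling: fd n = (F(n), F(n+1))
def fd (n : Nat) : Int × Int :=
  if h : n = 0 then (0, 1)
  else
    let p := fd (n / 2)
    let a := p.1
    let b := p.2
    let c := a * (2 * b - a)
    let d := a * a + b * b
    if n % 2 = 1 then (d, c + d) else (c, d)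
termination_by n
decreasing_by exact Nat.div_lt_self (Nat.pos_of_ne_zero h) (by norm_num)

def continued_fraction_golden_alt (terms : Int) : Int × Int :=
  if terms ≤ 0 then (1, 1)
  else
    let p := fd (terms + 1).toNat
    (p.2, p.1)

-- ===== PRECONDITION & SPEC =====
def Spec_continued_fraction_golden (terms : Int) (out : Int × Int) : Prop := out = continued_fraction_golden_alt terms
instance (terms : Int) (out : Int × Int) : Decidable (Spec_continued_fraction_golden terms out) := by unfold Spec_continued_fraction_golden; infer_instance

-- ===== CLAIM (what is proved, stated in full; the proofs are below) =====
def Claim_equal_continued_fraction_golden : Prop := ∀ (terms : Int), Dom_continued_fraction_golden terms → Spec_continued_fraction_golden terms (continued_fraction_golden terms)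

-- ===== LEMMAS AND PROOFS =====

theorem cfgLoop_fib (n : Nat) : ∀ (k : Nat),
    cfgLoop n ((Nat.fib (k + 1) : Int), (Nat.fib k : Int), (Nat.fib (k + 2) : Int), (Nat.fib (k + 1) : Int))
      = ((Nat.fib (n + k + 2) : Int), (Nat.fib (n + k + 1) : Int)) := by
  induction n with
  | zero => intro k; simp [cfgLoop]
  | succ m ih =>
    intro k
    have h1 : ((Nat.fib (k + 2) : Int) + (Nat.fib (k + 1) : Int)) = (Nat.fib (k + 3) : Int) := by
      have := Nat.fib_add_two (n := k + 1)
      push_cast [this]; ring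
    have h2 : ((Nat.fib (k + 1) : Int) + (Nat.fib k : Int)) = (Nat.fib (k + 2) : Int) := by
      have := Nat.fib_add_two (n := k)
      push_cast [this]; ring
    show cfgLoop m (_, _, _, _) = _
    rw [h1, h2]
    have := ih (k + 1)
    rw [show m + 1 + k + 2 = m + (k + 1) + 2 from by omega,
        show m + 1 + k + 1 = m + (k + 1) + 1 from by omega]
    exact this

theorem fd_fib (n : Nat) : fd n = ((Nat.fib n : Int), (Nat.fib (n + 1) : Int)) := by
  induction n using Nat.strong_induction_on with
  | _ n ih =>
    by_cases h : n = 0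
    · subst h; simp [fd]
    · rw [fd]; simp only [h, dite_false]
      have ihm := ih (n / 2) (Nat.div_lt_self (Nat.pos_of_ne_zero h) (by norm_num))
      rw [ihm]
      set m := n / 2 with hm
      have hle : Nat.fib m ≤ 2 * Nat.fib (m + 1) :=
        le_trans (Nat.fib_le_fib_succ) (by omega)
      rcases Nat.even_or_odd n with he | ho
      · -- n = 2 * m
        have hn : n = 2 * m := by
          rcases he with ⟨t, ht⟩; omega
        have hmod : ¬ (n % 2 = 1) := by omega
        simp only [hmod, if_false]
        have e1 : (Nat.fib n : Int) = (Nat.fib m : Int) * (2 * (Nat.fib (m + 1) : Int) - (Nat.fib m : Int)) := by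
          rw [hn, Nat.fib_two_mul]
          push_cast [Nat.cast_sub hle]
          ring
        have e2 : (Nat.fib (n + 1) : Int) = (Nat.fib m : Int) * (Nat.fib m : Int) + (Nat.fib (m + 1) : Int) * (Nat.fib (m + 1) : Int) := by
          rw [hn, Nat.fib_two_mul_add_one]
          push_cast; ring
        rw [Prod.mk.injEq]
        constructor
        · linarith [e1]
        · linarith [e2]
      · -- n = 2 * m + 1
        have hn : n = 2 * m + 1 := by
          rcases ho with ⟨t, ht⟩; omega
        have hmod : n % 2 = 1 := by omega
        simp only [hmod, if_true]
        have e2 : (Nat.fib n : Int) = (Nat.fib m : Int) * (Nat.fib m : Int) + (Nat.fib (m + 1) : Int) * (Nat.fib (m + 1) : Int) := by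
          rw [hn, Nat.fib_two_mul_add_one]; push_cast; ring
        have hle2 : Nat.fib (m + 1) ≤ 2 * Nat.fib (m + 1 + 1) :=
          le_trans (Nat.fib_le_fib_succ) (by omega)
        have hfa : (Nat.fib (m + 2) : Int) = (Nat.fib m : Int) + (Nat.fib (m + 1) : Int) := by
          rw [Nat.fib_add_two]; push_cast; ring
        have e3 : (Nat.fib (n + 1) : Int)
            = (Nat.fib m : Int) * (2 * (Nat.fib (m + 1) : Int) - (Nat.fib m : Int))
              + ((Nat.fib m : Int) * (Nat.fib m : Int) + (Nat.fib (m + 1) : Int) * (Nat.fib (m + 1) : Int)) := by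
          have h2m : n + 1 = 2 * (m + 1) := by omega
          rw [h2m, Nat.fib_two_mul]
          push_cast [Nat.cast_sub hle2]
          rw [show ((Nat.fib (m + 1 + 1) : Int)) = (Nat.fib m : Int) + (Nat.fib (m + 1) : Int) from hfa]
          ring
        rw [Prod.mk.injEq]
        constructor
        · linarith [e2]
        · linarith [e2, e3]

-- ===== VERDICT (by name: the statement is the Claim_ definition above) =====
theorem continued_fraction_golden_spec : Claim_equal_continued_fraction_golden := by
  intro terms _
  unfold Spec_continued_fraction_golden continued_fraction_golden continued_fraction_golden_alt
  by_cases h : terms ≤ 0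
  · simp [h]
  · simp only [h, if_false]
    have hpos : 0 < terms := by omega
    have hto : (terms + 1).toNat = terms.toNat + 1 := by omega
    rw [hto, fd_fib]
    have hl := cfgLoop_fib terms.toNat 0
    norm_num at hl
    simpa using hl
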